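-- pv_equiv track=rewrite | github.com/AndrewNelis/catlang | cat/parser.py | collect_function
-- ===== SOURCE A (Python) =====
-- def collect_function(line, dopen='[', dclose=']'):
--     '''
--     returns the string enclosed between the open and close delimiters
--
--     :param line: the string to be analyzed
--     :type line: string
--     :param dopen: the opening delimiter
--     :type dopen: string
--     :param close: the closing delimiter
--     :type close: string
--     :rtype: string
--
--     >>> p = Parser()
--     >>> p.collect_function('[1 2 3] a b c')
--     ('[1 2 3]', ' a b c')
--
--     >>> p.collect_function('[ test [ 1 2 3] ] a')
--     ('[ test [ 1 2 3] ]', ' a')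
--     '''
--
--     buf = ""
--     count = 0
--
--     while line:
--         c = line[0]
--         buf += c
--
--         if c == dopen:
--             count += 1
--
--         elif c == dclose:
--             count -= 1
--
--             if count == 0:
--                 return buf, line[1:]
--
--         line = line[1:]
--
--     return buf, line.lstrip()
-- ===== SOURCE B (Python) =====
-- def collect_function(line, dopen='[', dclose=']'):
--     depth = 0
--     for i, c in enumerate(line):
--         if c == dopen:
--             depth += 1
--         elif c == dclose:
--             depth -= 1
--             if depth == 0:
--                 return line[:i + 1], line[i + 1:]
--     return line, ""
-- ===== Notes on version B (the rewrite author's own statement) =====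
-- stated objective: faster
-- what changed: Replaces A's loop that rebuilds both the buffer (buf += c) and the remaining string (line = line[1:]) on every character with a single enumerate scan that tracks only the nesting depth and slices the original string once at the matching close delimiter.
import Mathlib
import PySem

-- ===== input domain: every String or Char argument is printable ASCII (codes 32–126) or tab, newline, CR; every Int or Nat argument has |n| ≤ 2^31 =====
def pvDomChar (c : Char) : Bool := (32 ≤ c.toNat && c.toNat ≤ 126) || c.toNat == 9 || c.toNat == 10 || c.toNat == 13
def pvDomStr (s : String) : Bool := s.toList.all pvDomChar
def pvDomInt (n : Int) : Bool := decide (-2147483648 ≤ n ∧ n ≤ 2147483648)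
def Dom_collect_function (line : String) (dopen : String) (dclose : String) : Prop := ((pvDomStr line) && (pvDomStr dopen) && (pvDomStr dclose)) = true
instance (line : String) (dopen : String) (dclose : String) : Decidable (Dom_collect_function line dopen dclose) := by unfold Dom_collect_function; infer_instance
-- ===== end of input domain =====

-- B replaces A's quadratic 'line = line[1:]' + 'buf += c' rebuild loop with a single
-- indexed depth-tracking scan that slices the original string once (objective: faster).

-- ===== PORT A =====
-- A's while loop: consumes 'line' from the front, accumulating 'buf' and the depth 'count'.
def pvALoop (dopen dclose : String) : List Char → List Char → Int → String × String
  | [], buf, _ => (String.ofList buf, String.ofList (PySem.Chars.lstrip []))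
  | c :: rest, buf, count =>
    let buf' := buf ++ [c]
    if String.ofList [c] = dopen then pvALoop dopen dclose rest buf' (count + 1)
    else if String.ofList [c] = dclose then
      if count - 1 = 0 then (String.ofList buf', String.ofList rest)
      else pvALoop dopen dclose rest buf' (count - 1)
    else pvALoop dopen dclose rest buf' count

def collect_function (line : String) (dopen : String) (dclose : String) : String × String :=
  pvALoop dopen dclose line.toList [] 0

-- ===== PORT B =====
-- B's for loop over enumerate(line), tracking only the depth; slices 'line' once on match.
def pvBLoop (line dopen dclose : String) : List (Int × Char) → Int → String × String
  | [], _ => (line, "")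
  | (i, c) :: rest, depth =>
    if String.ofList [c] = dopen then pvBLoop line dopen dclose rest (depth + 1)
    else if String.ofList [c] = dclose then
      if depth - 1 = 0 then
        (String.ofList (PySem.List.slice line.toList none (some (i + 1))),
         String.ofList (PySem.List.slice line.toList (some (i + 1)) none))
      else pvBLoop line dopen dclose rest (depth - 1)
    else pvBLoop line dopen dclose rest depth

def collect_function_alt (line : String) (dopen : String) (dclose : String) : String × String :=
  pvBLoop line dopen dclose (PySem.List.enumerate line.toList 0) 0

-- ===== PRECONDITION & SPEC =====
def Spec_collect_function (line : String) (dopen : String) (dclose : String) (out : String × String) : Prop := out = collect_function_alt line dopen dclose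
instance (line : String) (dopen : String) (dclose : String) (out : String × String) : Decidable (Spec_collect_function line dopen dclose out) := by unfold Spec_collect_function; infer_instance

-- ===== CLAIM (what is proved, stated in full; the proofs are below) =====
def Claim_equal_collect_function : Prop := ∀ (line : String) (dopen : String) (dclose : String), Dom_collect_function line dopen dclose → Spec_collect_function line dopen dclose (collect_function line dopen dclose)

-- ===== LEMMAS AND PROOFS =====

-- Loop invariant: A's loop on the unread suffix l2 with accumulated prefix l1 equals
-- B's loop on enumerate(l2) starting at index l1.length over the whole line l1 ++ l2.
theorem pvLoop_agree (dopen dclose : String) (l2 : List Char) : ∀ (l1 : List Char) (count : Int),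
    pvALoop dopen dclose l2 l1 count
      = pvBLoop (String.ofList (l1 ++ l2)) dopen dclose (PySem.List.enumerate l2 (l1.length : Int)) count := by
  induction l2 with
  | nil =>
    intro l1 count
    simp [pvALoop, pvBLoop, PySem.List.enumerate, PySem.Chars.lstrip]
  | cons c rest ih =>
    intro l1 count
    rw [PySem.List.enumerate_cons]
    by_cases h1 : String.ofList [c] = dopen
    · have := ih (l1 ++ [c]) (count + 1)
      simpa [pvALoop, pvBLoop, h1, List.append_assoc] using this
    · by_cases h2 : String.ofList [c] = dclose
      · by_cases h3 : count - 1 = 0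
        · simp only [pvALoop, pvBLoop]
          rw [if_neg h1, if_neg h1, if_pos h2, if_pos h2, if_pos h3, if_pos h3]
          have hi : ((l1.length : Int) + 1) = ((l1.length + 1 : Nat) : Int) := by push_cast; ring
          rw [String.toList_ofList, hi, PySem.List.slice_to_natCast, PySem.List.slice_from_natCast]
          have hsplit : l1 ++ c :: rest = (l1 ++ [c]) ++ rest := by simp
          rw [hsplit, List.take_left' (by simp), List.drop_left' (by simp)]
        · simp only [pvALoop, pvBLoop]
          rw [if_neg h1, if_neg h1, if_pos h2, if_pos h2, if_neg h3, if_neg h3]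
          have := ih (l1 ++ [c]) (count - 1)
          simpa [List.append_assoc] using this
      · simp only [pvALoop, pvBLoop]
        rw [if_neg h1, if_neg h1, if_neg h2, if_neg h2]
        have := ih (l1 ++ [c]) count
        simpa [List.append_assoc] using this

-- ===== VERDICT (by name: the statement is the Claim_ definition above) =====
theorem collect_function_spec : Claim_equal_collect_function := by
  intro line dopen dclose _
  show collect_function line dopen dclose = collect_function_alt line dopen dclose
  unfold collect_function collect_function_alt
  have := pvLoop_agree dopen dclose line.toList [] 0
  simpa [String.ofList_toList] using this
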